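-- pv_equiv track=rewrite | github.com/ysimonov/programming_experience | algorithms/price_combinations_problem/main.py | get_valid_combination
-- ===== SOURCE A (Python) =====
-- import itertools
--
-- def get_valid_combination(max_perm, path_lengths):
--     for permutation in itertools.product(range(max_perm), repeat=len(path_lengths)):
--         valid_combination = True
--         for (path_length, list_idx) in zip(path_lengths, permutation):
--             # check if path is valid
--             if list_idx > path_length:
--                 valid_combination = False
--                 break
--         if valid_combination:
--             yield permutation
-- ===== SOURCE B (Python) =====
-- import itertools
--
-- def get_valid_combination(max_perm, path_lengths):
--     ranges = [range(min(max_perm, pl + 1)) for pl in path_lengths]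
--     yield from itertools.product(*ranges)
-- ===== Notes on version B (the rewrite author's own statement) =====
-- stated objective: alternative
-- what changed: Instead of enumerating every tuple in range(max_perm)^n and filtering with an inner validity loop, B builds a per-position range of only the valid indices (min(max_perm, path_length+1)) and takes their cartesian product, so invalid tuples are never generated.
import Mathlib
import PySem

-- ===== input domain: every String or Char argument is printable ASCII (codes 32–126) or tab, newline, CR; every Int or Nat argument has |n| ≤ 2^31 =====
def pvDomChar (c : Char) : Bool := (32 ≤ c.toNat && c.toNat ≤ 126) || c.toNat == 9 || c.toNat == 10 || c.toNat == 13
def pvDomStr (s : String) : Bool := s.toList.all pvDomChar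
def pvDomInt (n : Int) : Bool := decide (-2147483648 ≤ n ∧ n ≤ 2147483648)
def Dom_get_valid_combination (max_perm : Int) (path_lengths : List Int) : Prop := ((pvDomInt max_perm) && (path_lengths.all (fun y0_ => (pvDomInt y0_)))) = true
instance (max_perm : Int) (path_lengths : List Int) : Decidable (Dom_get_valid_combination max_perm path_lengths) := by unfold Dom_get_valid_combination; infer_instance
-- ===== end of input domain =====

-- B replaces A's filter over the full cartesian product range(max_perm)^n by a cartesian product of
-- per-position ranges that contain only the valid indices, so invalid tuples are never generated (objective: alternative).

-- ===== PORT A =====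
-- itertools.product(range(max_perm), repeat=n), in itertools' order (first coordinate varies slowest)
def pvProdRep (m : Int) : Nat → List (List Int)
  | 0 => [[]]
  | n + 1 => (PySem.List.pyRange 0 m 1).flatMap (fun x => (pvProdRep m n).map (x :: ·))

-- A's inner validity loop with break, over zip(path_lengths, permutation)
def pvCheckValid : List (Int × Int) → Bool
  | [] => true
  | (pl, idx) :: rest => if idx > pl then false else pvCheckValid rest

def get_valid_combination (max_perm : Int) (path_lengths : List Int) : List (List Int) :=
  (pvProdRep max_perm path_lengths.length).filter
    (fun perm => pvCheckValid (path_lengths.zip perm))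

-- ===== PORT B =====
-- itertools.product(*ranges): cartesian product of a list of lists, first factor slowest
def pvListProd : List (List Int) → List (List Int)
  | [] => [[]]
  | r :: rs => r.flatMap (fun x => (pvListProd rs).map (x :: ·))

def get_valid_combination_alt (max_perm : Int) (path_lengths : List Int) : List (List Int) :=
  pvListProd (path_lengths.map (fun pl => PySem.List.pyRange 0 (min max_perm (pl + 1)) 1))

-- ===== PRECONDITION & SPEC =====
def Spec_get_valid_combination (max_perm : Int) (path_lengths : List Int) (out : List (List Int)) : Prop := out = get_valid_combination_alt max_perm path_lengths
instance (max_perm : Int) (path_lengths : List Int) (out : List (List Int)) : Decidable (Spec_get_valid_combination max_perm path_lengths out) := by unfold Spec_get_valid_combination; infer_instance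

-- ===== CLAIM (what is proved, stated in full; the proofs are below) =====
def Claim_equal_get_valid_combination : Prop := ∀ (max_perm : Int) (path_lengths : List Int), Dom_get_valid_combination max_perm path_lengths → Spec_get_valid_combination max_perm path_lengths (get_valid_combination max_perm path_lengths)

-- ===== LEMMAS AND PROOFS =====

-- filtering range(a,m) by ≤ p truncates it to range(a, min(m, p+1))
theorem pv_filter_range (a m p : Int) :
    (PySem.List.pyRange a m 1).filter (fun x => x ≤ p) = PySem.List.pyRange a (min m (p + 1)) 1 := by
  by_cases hm : m ≤ a
  · rw [PySem.List.pyRange_one_eq_nil hm, PySem.List.pyRange_one_eq_nil (by omega : min m (p+1) ≤ a)]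
    rfl
  · rw [PySem.List.pyRange_one_cons (by omega : a < m)]
    by_cases hp : a ≤ p
    · rw [PySem.List.pyRange_one_cons (by omega : a < min m (p+1)), List.filter_cons_of_pos (by simpa using hp)]
      rw [pv_filter_range (a + 1) m p]
    · rw [List.filter_cons_of_neg (by simpa using hp)]
      rw [pv_filter_range (a + 1) m p, PySem.List.pyRange_one_eq_nil (by omega : min m (p+1) ≤ a+1),
         PySem.List.pyRange_one_eq_nil (by omega : min m (p+1) ≤ a)]
termination_by (m - a).toNat
decreasing_by all_goals omega

-- flatMap of an ite-nil body is flatMap over the filter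
theorem pv_flatMap_ite {α β : Type} (p : α → Bool) (f : α → List β) (xs : List α) :
    xs.flatMap (fun x => if p x then f x else []) = (xs.filter p).flatMap f := by
  induction xs with
  | nil => rfl
  | cons a t ih => by_cases h : p a <;> simp [List.flatMap_cons, h, ih]

-- filtering the repeated product by A's validity check yields B's product of truncated ranges
theorem pv_main (m : Int) (pls : List Int) :
    (pvProdRep m pls.length).filter (fun perm => pvCheckValid (pls.zip perm)) =
      pvListProd (pls.map (fun pl => PySem.List.pyRange 0 (min m (pl + 1)) 1)) := by
  induction pls with
  | nil => rfl
  | cons p rest ih =>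
    simp only [List.length_cons, pvProdRep, List.map_cons, pvListProd]
    rw [List.filter_flatMap]
    have hstep : ∀ x : Int,
        ((pvProdRep m rest.length).map (x :: ·)).filter
            (fun perm => pvCheckValid ((p :: rest).zip perm)) =
          if (x ≤ p : Bool) then
            ((pvProdRep m rest.length).filter (fun perm => pvCheckValid (rest.zip perm))).map (x :: ·)
          else [] := by
      intro x
      rw [List.filter_map]
      by_cases hx : x ≤ p
      · simp only [decide_eq_true_eq, if_pos hx]
        congr 1
        apply List.filter_congr
        intro perm _
        simp [Function.comp, pvCheckValid, not_lt.mpr hx]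
      · simp only [decide_eq_true_eq, if_neg hx]
        rw [show (List.filter ((fun perm => pvCheckValid ((p :: rest).zip perm)) ∘ (x :: ·)) (pvProdRep m rest.length)) = [] from ?_]
        · simp
        · apply List.filter_eq_nil_iff.mpr
          intro perm _
          simp [Function.comp, pvCheckValid, lt_of_not_ge hx]
    rw [List.flatMap_congr (fun x _ => hstep x), pv_flatMap_ite, pv_filter_range, ih]

-- ===== VERDICT (by name: the statement is the Claim_ definition above) =====
theorem get_valid_combination_spec : Claim_equal_get_valid_combination := by
  intro m pls _
  unfold Spec_get_valid_combination get_valid_combination get_valid_combination_alt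
  exact pv_main m pls
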